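-- pv_equiv track=rewrite | github.com/GewitterHyperboreanCaldera/pythonProject | factoradic.py | factoradic_encode
-- ===== SOURCE A (Python) =====
-- import math
--
-- def factoradic_encode(n, elements):
--     result = []
--     for i in range(len(elements), 0, -1):
--         fact = math.factorial(i - 1)
--         index = n // fact
--         result.append(elements.pop(index))
--         n %= fact
--     return result
-- ===== SOURCE B (Python) =====
-- def factoradic_encode(n, elements):
--     # Mixed-radix decomposition from the least-significant digit up (no factorials),
--     # then one selection pass over the digits, most significant first.
--     digits = []
--     for i in range(1, len(elements) + 1):
--         n, d = divmod(n, i)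
--         digits.append(d)
--     result = []
--     for d in reversed(digits):
--         result.append(elements.pop(d))
--     return result
-- ===== Notes on version B (the rewrite author's own statement) =====
-- stated objective: faster
-- what changed: B replaces A's per-step factorial computation and big-number division (index = n // (i-1)! recomputed each iteration) by a single least-significant-first divmod chain n,d = divmod(n,i) that extracts all factoradic digits with small divisors, followed by one selection pass over the digits.
import Mathlib
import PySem

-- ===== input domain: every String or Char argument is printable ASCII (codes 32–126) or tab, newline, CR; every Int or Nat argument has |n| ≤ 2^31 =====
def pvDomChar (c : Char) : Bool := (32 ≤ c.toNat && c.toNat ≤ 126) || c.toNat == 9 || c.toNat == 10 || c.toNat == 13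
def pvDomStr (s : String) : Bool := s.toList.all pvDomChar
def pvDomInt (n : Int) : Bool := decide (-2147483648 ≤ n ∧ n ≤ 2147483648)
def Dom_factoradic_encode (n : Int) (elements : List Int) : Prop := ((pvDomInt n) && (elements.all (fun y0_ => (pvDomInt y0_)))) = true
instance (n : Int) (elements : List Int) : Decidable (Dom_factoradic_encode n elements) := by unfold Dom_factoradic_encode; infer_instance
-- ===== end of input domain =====

-- B replaces A's per-step factorial recomputation and big divisions by one low-to-high
-- divmod chain (small divisors) plus a selection pass; objective: faster (constant factor).
-- Both A and B mutate `elements` in place identically (they pop every element);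
-- the equivalence proved here is about the return value.

-- ===== PORT A =====
-- loop 'for i in range(len(elements), 0, -1)' as recursion on i; state (n, elements, result).
-- The 'none' branch is Python's IndexError from elements.pop(index); excluded by Pre_.
def factoradic_encode_go (n : Int) (elements : List Int) (result : List Int) (i : Nat) : List Int :=
  match i with
  | 0 => result
  | Nat.succ j =>
    let fact : Int := (Nat.factorial j : Int)        -- math.factorial(i - 1)
    let index := PySem.Int.floordiv n fact
    match PySem.List.pop? elements index with
    | none => result
    | some (x, rest) => factoradic_encode_go (PySem.Int.mod n fact) rest (result ++ [x]) j

def factoradic_encode (n : Int) (elements : List Int) : List Int :=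
  factoradic_encode_go n elements [] elements.length

-- ===== PORT B =====
-- first loop of Source B: 'for i in range(1, len(elements)+1): n, d = divmod(n, i); digits.append(d)'
def factoradic_encode_alt_digits (n : Int) (i m : Nat) (acc : List Int) : List Int :=
  if i ≤ m then
    factoradic_encode_alt_digits (PySem.Int.floordiv n (i : Int)) (i + 1) m
      (acc ++ [PySem.Int.mod n (i : Int)])
  else acc
termination_by m + 1 - i

-- second loop of Source B: 'for d in reversed(digits): result.append(elements.pop(d))'
-- ('none' = IndexError, unreachable inside Pre_)
def factoradic_encode_alt_select (ds : List Int) (es : List Int) (out : List Int) : List Int :=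
  match ds with
  | [] => out
  | d :: rest =>
    match PySem.List.pop? es d with
    | none => out
    | some (x, es') => factoradic_encode_alt_select rest es' (out ++ [x])

def factoradic_encode_alt (n : Int) (elements : List Int) : List Int :=
  factoradic_encode_alt_select
    (factoradic_encode_alt_digits n 1 elements.length []).reverse elements []

-- ===== PRECONDITION & SPEC =====
-- Pre_ excludes exactly the inputs on which A raises IndexError (elements.pop with an
-- out-of-range index): nonempty elements with n outside [-(m!), m!), m = len(elements).
def Pre_factoradic_encode (n : Int) (elements : List Int) : Prop :=
  elements = [] ∨
    (-(Nat.factorial elements.length : Int) ≤ n ∧ n < (Nat.factorial elements.length : Int))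
instance (n : Int) (elements : List Int) : Decidable (Pre_factoradic_encode n elements) := by
  unfold Pre_factoradic_encode; infer_instance

def pvWitness_factoradic_encode : Int × List Int := (3, [10, 20, 30])

def Spec_factoradic_encode (n : Int) (elements : List Int) (out : List Int) : Prop := out = factoradic_encode_alt n elements
instance (n : Int) (elements : List Int) (out : List Int) : Decidable (Spec_factoradic_encode n elements out) := by unfold Spec_factoradic_encode; infer_instance

-- ===== CLAIM (what is proved, stated in full; the proofs are below) =====
def Claim_equal_factoradic_encode : Prop := ∀ (n : Int) (elements : List Int), Dom_factoradic_encode n elements → Pre_factoradic_encode n elements → Spec_factoradic_encode n elements (factoradic_encode n elements)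

-- ===== LEMMAS AND PROOFS =====

-- proof-side view of B's digit loop: digits from radix i for k steps (Euclidean /, % ;
-- equal to Python's // , % since all divisors are positive)
def digsFrom (n : Int) (i k : Nat) : List Int :=
  match k with
  | 0 => []
  | Nat.succ k => (n % (i : Int)) :: digsFrom (n / (i : Int)) (i + 1) k

-- product of the radices i, i+1, ..., i+k-1
def prodFrom (i k : Nat) : Nat :=
  match k with
  | 0 => 1
  | Nat.succ k => i * prodFrom (i + 1) k

theorem prodFrom_snoc (i k : Nat) : prodFrom i (k + 1) = prodFrom i k * (i + k) := by
  induction k generalizing i with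
  | zero => simp [prodFrom]
  | succ k ih =>
    show i * prodFrom (i + 1) (k + 1) = prodFrom i (k + 1) * (i + (k + 1))
    rw [ih (i + 1)]
    show i * (prodFrom (i + 1) k * (i + 1 + k)) = i * prodFrom (i + 1) k * (i + (k + 1))
    have : i + 1 + k = i + (k + 1) := by omega
    rw [this]; ring

theorem prodFrom_one_eq_factorial (m : Nat) : prodFrom 1 m = Nat.factorial m := by
  induction m with
  | zero => rfl
  | succ m ih => rw [prodFrom_snoc, ih, Nat.factorial_succ]; ring

-- the port's digit loop is digsFrom
theorem alt_digits_eq_digsFrom_aux (k : Nat) :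
    ∀ (m i : Nat) (n : Int) (acc : List Int), 1 ≤ i → m + 1 - i = k →
      factoradic_encode_alt_digits n i m acc = acc ++ digsFrom n i k := by
  induction k with
  | zero =>
    intro m i n acc hi hk
    unfold factoradic_encode_alt_digits
    rw [if_neg (by omega)]; simp [digsFrom]
  | succ k ih =>
    intro m i n acc hi hk
    unfold factoradic_encode_alt_digits
    rw [if_pos (by omega)]
    rw [ih m (i + 1) _ _ (by omega) (by omega)]
    have hip : (0 : Int) < (i : Int) := by exact_mod_cast hi
    simp [digsFrom, PySem.Int.floordiv_eq_ediv_of_pos hip, PySem.Int.mod_eq_emod_of_pos hip]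

theorem alt_digits_eq_digsFrom (n : Int) (m : Nat) :
    factoradic_encode_alt_digits n 1 m [] = digsFrom n 1 m := by
  simpa using alt_digits_eq_digsFrom_aux m m 1 n [] (by omega) (by omega)

-- snoc form of the digit chain
theorem digsFrom_snoc (k : Nat) : ∀ (i : Nat) (n : Int), 1 ≤ i →
    digsFrom n i (k + 1)
      = digsFrom n i k ++ [ (n / (prodFrom i k : Int)) % ((i + k : Nat) : Int) ] := by
  induction k with
  | zero => intro i n hi; simp [digsFrom, prodFrom]
  | succ k ih =>
    intro i n hi
    show (n % (i : Int)) :: digsFrom (n / (i : Int)) (i + 1) (k + 1) = _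
    rw [ih (i + 1) (n / (i : Int)) (by omega)]
    have hdd : n / (i : Int) / (prodFrom (i + 1) k : Int)
        = n / ((prodFrom i (k + 1) : Nat) : Int) := by
      rw [Int.ediv_ediv_of_nonneg (by positivity)]
      have h : ((prodFrom i (k + 1) : Nat) : Int)
          = (i : Int) * ((prodFrom (i + 1) k : Nat) : Int) := by
        have h0 : prodFrom i (k + 1) = i * prodFrom (i + 1) k := rfl
        rw [h0]; push_cast; ring
      rw [h]
    rw [hdd]
    show ((n % (i : Int)) :: (digsFrom (n / (i : Int)) (i + 1) k
        ++ [n / ((prodFrom i (k + 1) : Nat) : Int) % ((i + 1 + k : Nat) : Int)])) = _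
    have h2 : i + 1 + k = i + (k + 1) := by omega
    rw [h2]
    rfl

-- (n % M) / i = (n / i) % (M / i) for positive i dividing M
theorem emod_ediv_eq (n M i : Int) (hi : 0 < i) (hM : 0 < M) (hdvd : i ∣ M) :
    (n % M) / i = (n / i) % (M / i) := by
  obtain ⟨c, hc⟩ := hdvd
  have hc0 : 0 < c := by nlinarith
  have hr0 : 0 ≤ n % M := Int.emod_nonneg n (by omega)
  have hrM : n % M < M := Int.emod_lt_of_pos n hM
  have hMi : M / i = c := by rw [hc]; exact Int.mul_ediv_cancel_left c (by omega)
  have h7 : n = n % M + n / M * c * i := by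
    have h8 := Int.emod_add_mul_ediv n M
    have h9 : n / M * M = n / M * c * i := by rw [hc]; ring
    linarith [h8, h9]
  have hdivsplit : n / i = n % M / i + n / M * c := by
    conv_lhs => rw [h7]
    exact Int.add_mul_ediv_right _ _ (by omega)
  have hlt : n % M / i < c := by
    rw [Int.ediv_lt_iff_lt_mul hi]; nlinarith
  have hge : 0 ≤ n % M / i := Int.ediv_nonneg hr0 (by omega)
  have hmm : (n % M / i + c * (n / M)) % c = (n % M / i) % c :=
    Int.add_mul_emod_self_left (n % M / i) c (n / M)
  rw [hMi, hdivsplit, mul_comm (n / M) c, hmm, Int.emod_eq_of_lt hge hlt]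

-- the digit chain only depends on n modulo any multiple of the radix product
theorem digsFrom_emod (k : Nat) : ∀ (i : Nat) (n M : Int), 1 ≤ i → 0 < M →
    ((prodFrom i k : Nat) : Int) ∣ M → digsFrom (n % M) i k = digsFrom n i k := by
  induction k with
  | zero => intro i n M _ _ _; rfl
  | succ k ih =>
    intro i n M hi hM hdvd
    have hip : (0 : Int) < (i : Int) := by exact_mod_cast hi
    have hnat : i ∣ prodFrom i (k + 1) := ⟨prodFrom (i + 1) k, rfl⟩
    have hiM : (i : Int) ∣ M := dvd_trans (Int.natCast_dvd_natCast.mpr hnat) hdvd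
    have hhead : (n % M) % (i : Int) = n % (i : Int) := Int.emod_emod_of_dvd n hiM
    have htail : (n % M) / (i : Int) = (n / (i : Int)) % (M / (i : Int)) :=
      emod_ediv_eq n M i hip hM hiM
    obtain ⟨c, hcM⟩ := hiM
    have hc0 : 0 < c := by nlinarith
    have hMi : M / (i : Int) = c := by
      rw [hcM]; exact Int.mul_ediv_cancel_left c (by omega)
    have hMi_pos : 0 < M / (i : Int) := by rw [hMi]; exact hc0
    have hdvd' : ((prodFrom (i + 1) k : Nat) : Int) ∣ M / (i : Int) := by
      obtain ⟨d, hd⟩ := hdvd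
      have hsplit : ((prodFrom i (k + 1) : Nat) : Int)
          = (i : Int) * ((prodFrom (i + 1) k : Nat) : Int) := by
        have h : prodFrom i (k + 1) = i * prodFrom (i + 1) k := rfl
        rw [h]; push_cast; ring
      refine ⟨d, ?_⟩
      rw [hd, hsplit, mul_assoc]
      exact Int.mul_ediv_cancel_left _ (by omega)
    show ((n % M) % (i : Int)) :: digsFrom ((n % M) / (i : Int)) (i + 1) k = _
    rw [hhead, htail, ih (i + 1) (n / (i : Int)) (M / (i : Int)) (by omega) hMi_pos hdvd']
    rfl

-- key decomposition: top digit splits off, remaining digits depend on n mod m!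
theorem digsFrom_key (m : Nat) (n : Int) :
    digsFrom n 1 (m + 1)
      = digsFrom (n % (Nat.factorial m : Int)) 1 m
        ++ [ (n / (Nat.factorial m : Int)) % ((1 + m : Nat) : Int) ] := by
  have h1 := digsFrom_snoc m 1 n (by omega)
  rw [prodFrom_one_eq_factorial] at h1
  have hfpos : (0 : Int) < (Nat.factorial m : Int) := by exact_mod_cast Nat.factorial_pos m
  have h2 := digsFrom_emod m 1 n (Nat.factorial m : Int) (by omega) hfpos
    (by rw [prodFrom_one_eq_factorial])
  rw [h1, h2]

-- accumulator lemmas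
theorem go_acc (i : Nat) : ∀ (n : Int) (es r : List Int),
    factoradic_encode_go n es r i = r ++ factoradic_encode_go n es [] i := by
  induction i with
  | zero => intro n es r; simp [factoradic_encode_go]
  | succ j ih =>
    intro n es r
    show (match PySem.List.pop? es _ with
      | none => r
      | some (x, rest) => factoradic_encode_go _ rest (r ++ [x]) j) = _
    cases h : PySem.List.pop? es (PySem.Int.floordiv n (Nat.factorial j : Int)) with
    | none => simp [factoradic_encode_go, h]
    | some p =>
      obtain ⟨x, rest⟩ := p
      simp only [factoradic_encode_go, h]
      rw [ih _ rest (r ++ [x]), ih _ rest ([] ++ [x])]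
      simp

theorem select_acc (ds : List Int) : ∀ (es out : List Int),
    factoradic_encode_alt_select ds es out = out ++ factoradic_encode_alt_select ds es [] := by
  induction ds with
  | nil => intro es out; simp [factoradic_encode_alt_select]
  | cons d rest ih =>
    intro es out
    show (match PySem.List.pop? es d with
      | none => out
      | some (x, es') => factoradic_encode_alt_select rest es' (out ++ [x])) = _
    cases h : PySem.List.pop? es d with
    | none => simp [factoradic_encode_alt_select, h]
    | some p =>
      obtain ⟨x, es'⟩ := p
      simp only [factoradic_encode_alt_select, h]
      rw [ih es' (out ++ [x]), ih es' ([] ++ [x])]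
      simp

-- the wrapped python index: in range -len <= idx < len, pyIdx? is idx mod len
theorem pyIdx_some (len : Nat) (idx : Int) (h1 : -(len : Int) ≤ idx) (h2 : idx < (len : Int)) :
    PySem.List.pyIdx? len idx = some ((idx % (len : Int)).toNat) := by
  have hlen : 0 < len := by omega
  by_cases h3 : 0 ≤ idx
  · have hmod : idx % (len : Int) = idx := Int.emod_eq_of_lt h3 h2
    simp [PySem.List.pyIdx?, h3, h2, hmod]
  · have hmod : idx % (len : Int) = idx + len := by
      have h6 : (idx + (len : Int) * 1) % (len : Int) = idx % (len : Int) :=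
        Int.add_mul_emod_self_left idx (len : Int) 1
      rw [mul_one] at h6
      rw [← h6]; exact Int.emod_eq_of_lt (by omega) (by omega)
    simp only [PySem.List.pyIdx?, hmod, if_neg h3, if_pos h1]
    congr 1
    omega

theorem pop_wrap (es : List Int) (idx : Int) (h1 : -(es.length : Int) ≤ idx)
    (h2 : idx < (es.length : Int)) :
    ∃ (k : Nat) (hk : k < es.length), (idx % (es.length : Int)) = (k : Int) ∧
      PySem.List.pop? es idx = some (es[k], es.eraseIdx k) ∧
      PySem.List.pop? es (idx % (es.length : Int)) = some (es[k], es.eraseIdx k) := by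
  have hlen : 0 < es.length := by omega
  have hmod0 : 0 ≤ idx % (es.length : Int) := Int.emod_nonneg idx (by omega)
  have hmodlt : idx % (es.length : Int) < (es.length : Int) :=
    Int.emod_lt_of_pos idx (by omega)
  have hklt : (idx % (es.length : Int)).toNat < es.length := by omega
  refine ⟨(idx % (es.length : Int)).toNat, hklt, by omega, ?_, ?_⟩
  · unfold PySem.List.pop?
    rw [pyIdx_some es.length idx h1 h2]
    simp [List.getElem?_eq_getElem hklt]
  · unfold PySem.List.pop?
    rw [pyIdx_some es.length (idx % (es.length : Int)) (by omega) hmodlt,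
      Int.emod_emod_of_dvd _ dvd_rfl]
    simp [List.getElem?_eq_getElem hklt]

theorem main_equiv (m : Nat) : ∀ (es : List Int) (n : Int), es.length = m →
    (es = [] ∨ (-(Nat.factorial m : Int) ≤ n ∧ n < (Nat.factorial m : Int))) →
    factoradic_encode_go n es [] m
      = factoradic_encode_alt_select (digsFrom n 1 m).reverse es [] := by
  induction m with
  | zero =>
    intro es n hlen _
    simp [factoradic_encode_go, digsFrom, factoradic_encode_alt_select]
  | succ m ih =>
    intro es n hlen hpre
    have hes : es ≠ [] := by intro h; rw [h] at hlen; simp at hlen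
    rcases hpre with h | ⟨hlo, hhi⟩
    · exact absurd h hes
    have hfpos : (0 : Int) < (Nat.factorial m : Int) := by exact_mod_cast Nat.factorial_pos m
    have hfsucc : ((Nat.factorial (m + 1) : Nat) : Int)
        = ((m : Int) + 1) * (Nat.factorial m : Int) := by
      rw [Nat.factorial_succ]; push_cast; ring
    set F : Int := (Nat.factorial m : Int) with hF
    set idx : Int := n / F with hidx
    have hidx_lt : idx < (es.length : Int) := by
      rw [hlen]; push_cast
      rw [hidx, Int.ediv_lt_iff_lt_mul hfpos]
      rw [hfsucc] at hhi; linarith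
    have hidx_ge : -(es.length : Int) ≤ idx := by
      rw [hlen]; push_cast
      rw [hidx, Int.le_ediv_iff_mul_le hfpos]
      rw [hfsucc] at hlo; linarith
    obtain ⟨k, hklt, hkeq, hpopA, hpopB⟩ := pop_wrap es idx hidx_ge hidx_lt
    have hfloordiv : PySem.Int.floordiv n F = idx := PySem.Int.floordiv_eq_ediv_of_pos hfpos
    have hmodA : PySem.Int.mod n F = n % F := PySem.Int.mod_eq_emod_of_pos hfpos
    -- A side takes one step: pop at idx, recurse on n % F
    have hA : factoradic_encode_go n es [] (m + 1)
        = es[k] :: factoradic_encode_go (n % F) (es.eraseIdx k) [] m := by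
      show (match PySem.List.pop? es (PySem.Int.floordiv n ((Nat.factorial m : Nat) : Int)) with
        | none => ([] : List Int)
        | some (x, rest) =>
            factoradic_encode_go (PySem.Int.mod n ((Nat.factorial m : Nat) : Int)) rest
              ([] ++ [x]) m) = _
      rw [show ((Nat.factorial m : Nat) : Int) = F from rfl, hfloordiv, hpopA]
      simp only [hmodA, List.nil_append]
      rw [go_acc m (n % F) (es.eraseIdx k) [es[k]]]
      rfl
    -- B side: top digit is idx mod len, then the digits of n % F
    have hidx_mod : idx % ((1 + m : Nat) : Int) = idx % (es.length : Int) := by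
      rw [hlen]
      congr 1
      push_cast
      ring
    have hB : (digsFrom n 1 (m + 1)).reverse
        = (idx % (es.length : Int)) :: (digsFrom (n % F) 1 m).reverse := by
      rw [digsFrom_key m n, ← hF, ← hidx, hidx_mod, List.reverse_append]
      rfl
    have hBsel : factoradic_encode_alt_select (digsFrom n 1 (m + 1)).reverse es []
        = es[k] :: factoradic_encode_alt_select (digsFrom (n % F) 1 m).reverse
            (es.eraseIdx k) [] := by
      rw [hB]
      show (match PySem.List.pop? es (idx % (es.length : Int)) with
        | none => ([] : List Int)
        | some (x, es') =>
            factoradic_encode_alt_select (digsFrom (n % F) 1 m).reverse es' ([] ++ [x])) = _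
      rw [hpopB]
      simp only [List.nil_append]
      rw [select_acc _ (es.eraseIdx k) [es[k]]]
      rfl
    have hlen' : (es.eraseIdx k).length = m := by
      rw [List.length_eraseIdx_of_lt hklt, hlen]
      omega
    have hrec := ih (es.eraseIdx k) (n % F) hlen' (Or.inr
      ⟨by have := Int.emod_nonneg n (show F ≠ 0 by omega); omega,
       Int.emod_lt_of_pos n hfpos⟩)
    rw [hA, hBsel, hrec]

-- ===== VERDICT (by name: the statement is the Claim_ definition above) =====
theorem factoradic_encode_spec : Claim_equal_factoradic_encode := by
  intro n elements _ hpre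
  show factoradic_encode n elements = factoradic_encode_alt n elements
  unfold factoradic_encode factoradic_encode_alt
  rw [alt_digits_eq_digsFrom]
  exact main_equiv elements.length elements n rfl hpre
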